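-- pv_equiv track=rewrite | github.com/thorwhalen/ut | pdict/to.py | inverse_one_to_many
-- ===== SOURCE A (Python) =====
-- import itertools
--
-- def inverse_one_to_many(d):
--     '''
--     :param d: a dict that is such that each (unique) key is mapped to a list of values (whose values are globally unique)
--     :return: returns the inverse (value->key) dict
--
--     Example:
--         inverse_one_to_many({'A':['a','aa','aaa'], 'B':['b','bb']})
--             == {'a': 'A', 'aa': 'A', 'b': 'B', 'aaa': 'A', 'bb': 'B'}
--     '''
--     value_list = list(itertools.chain.from_iterable(list(d.values())))
--     assert len(value_list) == len(set(value_list)), "You cannot use values_to_keys_dict() if there are duplicate values"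
--     inverse_dict = dict()
--     for k, v in d.items():
--         for vv in v:
--             inverse_dict[vv] = k
--     return inverse_dict
-- ===== SOURCE B (Python) =====
-- def inverse_one_to_many(d):
--     # Duplicate detection by sort-and-adjacent-compare instead of a set;
--     # the inverse dict is built recursively per key via dict.fromkeys + update merging.
--     vs = sorted(vv for v in d.values() for vv in v)
--     assert all(a != b for a, b in zip(vs, vs[1:])), \
--         "You cannot use values_to_keys_dict() if there are duplicate values"
--
--     def go(items):
--         if not items:
--             return {}
--         (k, v), rest = items[0], items[1:]
--         head = dict.fromkeys(v, k)
--         head.update(go(rest))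
--         return head
--
--     return go(list(d.items()))
-- ===== Notes on version B (the rewrite author's own statement) =====
-- stated objective: alternative
-- what changed: B detects duplicate values by sorting the flattened values and comparing adjacent elements (instead of A's set/length check), and builds the inverse dict by structural recursion over the items, making each key's block with dict.fromkeys and merging the recursive result with dict.update, instead of A's nested insertion loop into one accumulator.
import Mathlib
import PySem

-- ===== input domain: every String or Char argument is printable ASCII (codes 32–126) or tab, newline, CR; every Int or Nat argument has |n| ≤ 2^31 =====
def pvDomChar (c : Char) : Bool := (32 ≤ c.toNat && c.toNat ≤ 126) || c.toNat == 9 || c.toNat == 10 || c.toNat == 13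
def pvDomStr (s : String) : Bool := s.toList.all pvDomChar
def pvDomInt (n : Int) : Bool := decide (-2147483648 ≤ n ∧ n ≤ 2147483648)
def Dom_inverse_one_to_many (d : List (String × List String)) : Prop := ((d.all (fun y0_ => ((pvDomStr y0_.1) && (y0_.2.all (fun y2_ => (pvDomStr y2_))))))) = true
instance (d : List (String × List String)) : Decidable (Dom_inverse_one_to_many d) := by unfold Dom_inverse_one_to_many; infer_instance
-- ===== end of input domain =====

-- B checks for duplicate values by sorting and comparing neighbours, and builds the inverse
-- dict by structural recursion (dict.fromkeys per key, merged with dict.update), instead of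
-- A's set/length screen plus nested insertion loop. On duplicates both raise the same
-- AssertionError (outside Pre_).

-- ===== PORT A =====
def inverse_one_to_many (d : List (String × List String)) : List (String × String) :=
  -- value_list = list(itertools.chain.from_iterable(list(d.values())))
  let _value_list : List String := (d.map (·.2)).flatten
  -- assert len(value_list) == len(set(value_list))  — raises outside Pre_
  -- for k, v in d.items(): for vv in v: inverse_dict[vv] = k
  let inverse_dict : PySem.Dict String String :=
    d.foldl (fun acc kv => kv.2.foldl (fun acc2 vv => acc2.insert vv kv.1) acc) PySem.Dict.empty
  inverse_dict.items

-- ===== PORT B =====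
-- def go(items): if not items: return {}
--   (k, v), rest = items[0], items[1:]; head = dict.fromkeys(v, k); head.update(go(rest)); return head
def invGo (items : List (String × List String)) : PySem.Dict String String :=
  match items with
  | [] => PySem.Dict.empty
  | (k, v) :: rest =>
    let head : PySem.Dict String String :=
      v.foldl (fun acc vv => acc.insert vv k) PySem.Dict.empty   -- dict.fromkeys(v, k)
    head.update (invGo rest).items                               -- head.update(go(rest))

def inverse_one_to_many_alt (d : List (String × List String)) : List (String × String) :=
  -- vs = sorted(vv for v in d.values() for vv in v)
  let _vs : List String := PySem.List.sorted (d.flatMap (fun kv => kv.2)) (fun x => x) false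
  -- assert all(a != b for a, b in zip(vs, vs[1:]))  — raises outside Pre_
  (invGo d).items

-- ===== PRECONDITION & SPEC =====
-- Pre_ excludes exactly the inputs whose values contain a global duplicate:
-- there both programs raise AssertionError ("You cannot use values_to_keys_dict() ...").
def Pre_inverse_one_to_many (d : List (String × List String)) : Prop :=
  ((d.map (·.2)).flatten).Nodup
instance (d : List (String × List String)) : Decidable (Pre_inverse_one_to_many d) := by
  unfold Pre_inverse_one_to_many; infer_instance

def pvWitness_inverse_one_to_many : (List (String × List String)) :=
  [("A", ["a", "aa", "aaa"]), ("B", ["b", "bb"])]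

def Spec_inverse_one_to_many (d : List (String × List String)) (out : List (String × String)) : Prop := out = inverse_one_to_many_alt d
instance (d : List (String × List String)) (out : List (String × String)) : Decidable (Spec_inverse_one_to_many d out) := by unfold Spec_inverse_one_to_many; infer_instance

-- ===== CLAIM =====
def Claim_equal_inverse_one_to_many : Prop := ∀ (d : List (String × List String)), Dom_inverse_one_to_many d → Pre_inverse_one_to_many d → Spec_inverse_one_to_many d (inverse_one_to_many d)

-- ===== LEMMAS AND PROOFS =====

-- A's nested insertion loop over globally fresh, distinct values appends all its pairs.
theorem inverse_loop_items (d : List (String × List String))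
    (acc : PySem.Dict String String)
    (h : (acc.keys ++ (d.map (·.2)).flatten).Nodup) :
    (d.foldl (fun acc kv => kv.2.foldl (fun acc2 vv => acc2.insert vv kv.1) acc) acc).items
      = acc.items ++ d.flatMap (fun kv => kv.2.map (fun vv => (vv, kv.1))) := by
  induction d generalizing acc with
  | nil => simp
  | cons kv rest ih =>
    simp only [List.foldl_cons, List.flatMap_cons]
    have hnd : (acc.keys ++ (kv.2 ++ ((rest.map (·.2)).flatten))).Nodup := h
    have hfresh : ∀ vv ∈ kv.2, acc.contains vv = false := by
      intro vv hvv
      have hnm : vv ∉ acc.keys := fun hmem =>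
        (List.nodup_append.mp hnd).2.2 vv hmem vv (List.mem_append_left _ hvv) rfl
      simp [PySem.Dict.contains_eq_decide_mem_keys, hnm]
    have hkv : kv.2.Nodup := ((hnd.of_append_right).of_append_left)
    have hinner :
        (kv.2.foldl (fun acc2 vv => acc2.insert vv kv.1) acc).items
          = acc.items ++ kv.2.map (fun vv => (vv, kv.1)) := by
      simpa using
        PySem.Dict.items_foldl_insert_fresh (l := kv.2) (k := fun vv => vv)
          (v := fun _ => kv.1) (d := acc) hfresh (by simpa using hkv)
    have hkeys :
        (kv.2.foldl (fun acc2 vv => acc2.insert vv kv.1) acc).keys = acc.keys ++ kv.2 := by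
      have := congrArg (List.map (·.1)) hinner
      simpa [PySem.Dict.keys, Function.comp_def] using this
    rw [ih]
    · rw [hinner, List.append_assoc]
    · rw [hkeys]
      simpa [List.append_assoc] using hnd

-- B's recursive merge produces the flattened (value, key) pairs in order.
theorem invGo_items (d : List (String × List String))
    (h : ((d.map (·.2)).flatten).Nodup) :
    (invGo d).items = d.flatMap (fun kv => kv.2.map (fun vv => (vv, kv.1))) := by
  induction d with
  | nil => simp [invGo, PySem.Dict.empty]
  | cons kv rest ih =>
    obtain ⟨k, v⟩ := kv
    simp only [List.map_cons, List.flatten_cons] at h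
    have hv : v.Nodup := h.of_append_left
    have hrest : ((rest.map (·.2)).flatten).Nodup := h.of_append_right
    have hdisj : ∀ x ∈ (rest.map (·.2)).flatten, x ∉ v := by
      intro x hx hxv
      exact (List.nodup_append.mp h).2.2 x hxv x hx rfl
    have hheadfresh : ∀ vv ∈ v,
        (PySem.Dict.empty : PySem.Dict String String).contains vv = false := by
      intro vv _; simp
    have hhead :
        (v.foldl (fun acc vv => acc.insert vv k) PySem.Dict.empty).items
          = v.map (fun vv => (vv, k)) := by
      simpa using
        PySem.Dict.items_foldl_insert_fresh (l := v) (k := fun vv => vv)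
          (v := fun _ => k) (d := (PySem.Dict.empty : PySem.Dict String String))
          hheadfresh (by simpa using hv)
    have hheadkeys :
        (v.foldl (fun acc vv => acc.insert vv k) PySem.Dict.empty).keys = v := by
      have := congrArg (List.map (·.1)) hhead
      simpa [PySem.Dict.keys, Function.comp_def] using this
    have hLmap : ((invGo rest).items.map (·.1)) = (rest.map (·.2)).flatten := by
      rw [ih hrest]
      simp [List.map_map, Function.comp_def, List.flatMap_def]
    have hfresh2 : ∀ p ∈ (invGo rest).items,
        (v.foldl (fun acc vv => acc.insert vv k) PySem.Dict.empty).contains p.1 = false := by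
      intro p hp
      have hp1 : p.1 ∈ (rest.map (·.2)).flatten := by
        rw [← hLmap]; exact List.mem_map_of_mem hp
      have : p.1 ∉ v := hdisj p.1 hp1
      simp [PySem.Dict.contains_eq_decide_mem_keys, hheadkeys, this]
    have hnodup2 : ((invGo rest).items.map (·.1)).Nodup := by
      rw [hLmap]; exact hrest
    have hupd := PySem.Dict.items_foldl_insert_fresh
      (l := (invGo rest).items) (k := fun p => p.1) (v := fun p => p.2)
      (d := v.foldl (fun acc vv => acc.insert vv k) PySem.Dict.empty) hfresh2 hnodup2
    show ((v.foldl (fun acc vv => acc.insert vv k) PySem.Dict.empty).update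
            (invGo rest).items).items = _
    have hupd' : ((v.foldl (fun acc vv => acc.insert vv k) PySem.Dict.empty).update
            (invGo rest).items).items
        = (v.foldl (fun acc vv => acc.insert vv k) PySem.Dict.empty).items
            ++ (invGo rest).items.map (fun p => (p.1, p.2)) := hupd
    rw [hupd', hhead, ih hrest]
    simp [List.flatMap_cons]

-- ===== VERDICT =====
theorem inverse_one_to_many_spec : Claim_equal_inverse_one_to_many := by
  intro d _hdom hpre
  unfold Spec_inverse_one_to_many inverse_one_to_many inverse_one_to_many_alt
  have hA := inverse_loop_items d PySem.Dict.empty (by simpa [PySem.Dict.keys] using hpre)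
  have hB := invGo_items d hpre
  simp only [hA, hB]
  simp [PySem.Dict.empty]
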